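-- pv_equiv track=rewrite | github.com/tysonye/dufs-gui | dufs_multi_gui_pyqt.py | _sanitize_command_argument
-- ===== SOURCE A (Python) =====
-- def _sanitize_command_argument(arg):
--     """清理命令行参数，防止注入攻击
--
--     Args:
--         arg (str): 要清理的命令行参数
--
--     Returns:
--         str: 清理后的安全参数
--     """
--     if not arg:
--         return arg
--
--     # 移除首尾空白字符
--     arg = arg.strip()
--
--     # 移除Windows特有的危险字符，防止命令注入
--     dangerous_chars = ['&', '|', '<', '>', '^', '%']
--     for char in dangerous_chars:
--         arg = arg.replace(char, '')
--
--     return arg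
-- ===== SOURCE B (Python) =====
-- def _sanitize_command_argument(arg):
--     """Single-pass sanitizer: strip, then keep only non-dangerous characters."""
--     if not arg:
--         return arg
--     return ''.join(c for c in arg.strip() if c not in {'&', '|', '<', '>', '^', '%'})
-- ===== Notes on version B (the rewrite author's own statement) =====
-- stated objective: simpler
-- what changed: Replaces six sequential full-string replace passes with a single filtering traversal of the stripped string.
import Mathlib
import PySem

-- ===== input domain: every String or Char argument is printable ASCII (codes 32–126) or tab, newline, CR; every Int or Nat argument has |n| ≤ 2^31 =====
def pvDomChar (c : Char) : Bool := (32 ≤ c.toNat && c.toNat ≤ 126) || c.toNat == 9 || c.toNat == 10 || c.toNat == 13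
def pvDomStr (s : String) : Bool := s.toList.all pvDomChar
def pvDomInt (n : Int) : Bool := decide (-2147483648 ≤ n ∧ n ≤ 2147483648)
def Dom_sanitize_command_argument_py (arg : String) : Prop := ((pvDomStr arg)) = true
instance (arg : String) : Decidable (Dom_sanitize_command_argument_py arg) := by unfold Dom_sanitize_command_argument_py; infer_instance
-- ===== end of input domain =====

-- B does a single filtering pass over the stripped string instead of A's six sequential replace passes (objective: simpler).

-- ===== PORT A =====
-- A: guard on empty string, strip, then a loop over the six dangerous chars, each iteration
-- doing a full-string replace with ''.
def sanitize_command_argument_py (arg : String) : String :=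
  if arg = "" then arg
  else
    let s := PySem.Str.strip arg
    ['&', '|', '<', '>', '^', '%'].foldl
      (fun a ch => PySem.Str.replace a (String.ofList [ch]) "") s

-- ===== PORT B =====
-- B: guard on empty string, then one pass keeping characters not in the dangerous set.
def sanitize_command_argument_py_alt (arg : String) : String :=
  if arg = "" then arg
  else String.ofList ((PySem.Str.strip arg).toList.filter
    (fun c => !decide (c ∈ ['&', '|', '<', '>', '^', '%'])))

-- ===== PRECONDITION & SPEC =====
def Spec_sanitize_command_argument_py (arg : String) (out : String) : Prop := out = sanitize_command_argument_py_alt arg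
instance (arg : String) (out : String) : Decidable (Spec_sanitize_command_argument_py arg out) := by unfold Spec_sanitize_command_argument_py; infer_instance

-- ===== CLAIM (what is proved, stated in full; the proofs are below) =====
def Claim_equal_sanitize_command_argument_py : Prop := ∀ (arg : String), Dom_sanitize_command_argument_py arg → Spec_sanitize_command_argument_py arg (sanitize_command_argument_py arg)

-- ===== LEMMAS AND PROOFS =====

-- PySem.Chars.replace.go with a single-char pattern and empty replacement acts as a filter.
theorem replace_go_filter (ch : Char) (l : List Char) : ∀ (acc : List Char) (fuel : Nat),
    l.length ≤ fuel →
    PySem.Chars.replace.go [ch] [] fuel l acc = acc.reverse ++ l.filter (fun x => x ≠ ch) := by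
  induction l with
  | nil =>
    intro acc fuel _
    cases fuel <;> simp [PySem.Chars.replace.go]
  | cons c t ih =>
    intro acc fuel hle
    cases fuel with
    | zero => simp at hle
    | succ fuel =>
      simp only [List.length_cons, Nat.add_le_add_iff_right] at hle
      by_cases h : c = ch
      · subst h
        have hpre : List.isPrefixOf [c] (c :: t) = true := by simp [List.isPrefixOf]
        simp only [PySem.Chars.replace.go, hpre, if_true, List.length_cons, List.length_nil,
          List.drop_succ_cons, List.drop_zero, List.reverse_nil, List.nil_append]
        rw [ih acc fuel hle]
        simp
      · have hpre : List.isPrefixOf [ch] (c :: t) = false := by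
          simp [List.isPrefixOf]; exact fun e => h e.symm
        simp only [PySem.Chars.replace.go, hpre, Bool.false_eq_true, if_false]
        rw [ih (c :: acc) fuel hle]
        simp [h]

-- replacing one character by the empty string is filtering it out
theorem replace_single_filter (cs : List Char) (ch : Char) :
    PySem.Chars.replace cs [ch] [] = cs.filter (fun x => x ≠ ch) := by
  rw [PySem.Chars.replace]
  simpa using replace_go_filter ch cs [] cs.length le_rfl

-- ===== VERDICT (by name: the statement is the Claim_ definition above) =====
theorem sanitize_command_argument_py_spec : Claim_equal_sanitize_command_argument_py := by
  intro arg _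
  unfold Spec_sanitize_command_argument_py sanitize_command_argument_py sanitize_command_argument_py_alt
  by_cases h : arg = ""
  · simp [h]
  · simp only [h, if_false]
    apply String.ext
    simp only [List.foldl, PySem.Str.toList_replace, String.toList_ofList, String.toList_empty,
      replace_single_filter, List.filter_filter]
    apply List.filter_congr
    intro x _
    by_cases hx : x ∈ (['&', '|', '<', '>', '^', '%'] : List Char) <;> simp_all <;> tauto
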